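-- pv_equiv track=rewrite | github.com/hunj/adventofcode | 2023/9.py | extrapolated_value_by_appending
-- ===== SOURCE A (Python) =====
-- def extrapolated_value_by_appending(history):
--     for idx in reversed(range(len(history))):
--         if idx == len(history)-1:
--             history[idx].append(0)
--         else:
--             to_append = history[idx][-1] + history[idx + 1][-1]
--             history[idx].append(to_append)
--     return history
-- ===== SOURCE B (Python) =====
-- def extrapolated_value_by_appending(history):
--     out = []
--     acc = None
--     for row in reversed(history):
--         if acc is None:
--             acc = 0
--         else:
--             acc = row[-1] + acc
--         out.append(row + [acc])
--     out.reverse()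
--     return out
-- ===== Notes on version B (the rewrite author's own statement) =====
-- stated objective: simpler
-- what changed: Replaces the index loop with cross-row history[idx+1][-1] lookups and in-place mutation by a single backward pass carrying a scalar accumulator, building a fresh result list (B does not mutate its argument; return values are equal).
import Mathlib
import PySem

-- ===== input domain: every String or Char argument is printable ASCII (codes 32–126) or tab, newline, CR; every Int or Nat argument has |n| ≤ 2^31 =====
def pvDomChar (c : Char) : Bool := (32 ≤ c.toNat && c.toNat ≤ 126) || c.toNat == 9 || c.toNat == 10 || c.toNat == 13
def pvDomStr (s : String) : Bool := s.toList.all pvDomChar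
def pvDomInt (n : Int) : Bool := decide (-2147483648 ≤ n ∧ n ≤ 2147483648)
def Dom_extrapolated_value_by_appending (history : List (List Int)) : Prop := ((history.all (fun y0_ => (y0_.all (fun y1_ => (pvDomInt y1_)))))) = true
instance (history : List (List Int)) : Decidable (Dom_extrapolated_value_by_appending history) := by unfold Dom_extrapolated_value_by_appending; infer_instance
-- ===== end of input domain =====

-- B replaces A's index loop (with its history[idx+1][-1] cross-row lookup and in-place
-- appends) by one backward pass with a scalar accumulator building a fresh list; A mutates
-- its argument and returns it, B returns a new list — the equivalence is about the return value.

-- ===== PORT A =====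
-- loop body of A: one iteration at index idx on the current list h
def pvStepA (h : List (List Int)) (idx : Int) : List (List Int) :=
  if idx = (h.length : Int) - 1 then
    PySem.List.pySetD h idx (PySem.List.pyGetD h idx [] ++ [(0 : Int)])
  else
    let toAppend := PySem.List.pyGetD (PySem.List.pyGetD h idx []) (-1) 0
                  + PySem.List.pyGetD (PySem.List.pyGetD h (idx + 1) []) (-1) 0
    PySem.List.pySetD h idx (PySem.List.pyGetD h idx [] ++ [toAppend])

def extrapolated_value_by_appending (history : List (List Int)) : List (List Int) :=
  ((PySem.List.pyRange 0 (history.length : Int) 1).reverse).foldl pvStepA history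

-- ===== PORT B =====
-- loop body of B: state is (out, acc), acc = none until the first (last) row is processed
def pvStepB (st : List (List Int) × Option Int) (row : List Int) : List (List Int) × Option Int :=
  match st.2 with
  | none => (st.1 ++ [row ++ [(0 : Int)]], some 0)
  | some a =>
      let acc := PySem.List.pyGetD row (-1) 0 + a
      (st.1 ++ [row ++ [acc]], some acc)

def extrapolated_value_by_appending_alt (history : List (List Int)) : List (List Int) :=
  (history.reverse.foldl pvStepB ([], none)).1.reverse

-- ===== PRECONDITION & SPEC =====
-- Pre_ excludes exactly the inputs where the Python A raises IndexError (history[idx][-1] on an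
-- empty non-terminal row); B raises IndexError there too (row[-1]).
def Pre_extrapolated_value_by_appending (history : List (List Int)) : Prop :=
  ∀ r ∈ history.dropLast, r ≠ []
instance (history : List (List Int)) : Decidable (Pre_extrapolated_value_by_appending history) := by unfold Pre_extrapolated_value_by_appending; infer_instance

def pvWitness_extrapolated_value_by_appending : List (List Int) := [[1, 2], [1]]

def Spec_extrapolated_value_by_appending (history : List (List Int)) (out : List (List Int)) : Prop := out = extrapolated_value_by_appending_alt history
instance (history : List (List Int)) (out : List (List Int)) : Decidable (Spec_extrapolated_value_by_appending history out) := by unfold Spec_extrapolated_value_by_appending; infer_instance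

-- ===== CLAIM (what is proved, stated in full; the proofs are below) =====
def Claim_equal_extrapolated_value_by_appending : Prop := ∀ (history : List (List Int)), Dom_extrapolated_value_by_appending history → Pre_extrapolated_value_by_appending history → Spec_extrapolated_value_by_appending history (extrapolated_value_by_appending history)

-- ===== LEMMAS AND PROOFS =====

-- Reference recursion: pvExt l = (rows of l each with its extrapolated value appended,
-- the value appended to the FIRST row of l); computed from the back.
def pvExt : List (List Int) → List (List Int) × Int
  | [] => ([], 0)
  | [r] => ([r ++ [(0 : Int)]], 0)
  | r :: s :: t =>
      let p := pvExt (s :: t)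
      let v := PySem.List.pyGetD r (-1) 0 + p.2
      ((r ++ [v]) :: p.1, v)

lemma pvExt_snd_cons (r : List Int) (rest : List (List Int)) (h : rest ≠ []) :
    (pvExt (r :: rest)).2 = PySem.List.pyGetD r (-1) 0 + (pvExt rest).2 := by
  cases rest with
  | nil => exact absurd rfl h
  | cons s t => rfl

lemma pvExt_destruct (r : List Int) (rest : List (List Int)) :
    (pvExt (r :: rest)).1 = (r ++ [(pvExt (r :: rest)).2]) :: (pvExt rest).1 := by
  cases rest with
  | nil => rfl
  | cons s t => rfl

lemma pvExt_length (l : List (List Int)) : (pvExt l).1.length = l.length := by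
  induction l with
  | nil => rfl
  | cons r rest ih => rw [pvExt_destruct]; simp [ih]

-- one step of A's loop, in terms of pvExt
lemma pvStepA_eq (history : List (List Int)) (k : Nat) (hk : k < history.length) :
    pvStepA (history.take (k + 1) ++ (pvExt (history.drop (k + 1))).1) (k : Int)
      = history.take k ++ (pvExt (history.drop k)).1 := by
  have hlen : (history.take (k + 1) ++ (pvExt (history.drop (k + 1))).1).length
      = history.length := by
    simp [pvExt_length]; omega
  by_cases hlast : k + 1 = history.length
  · -- last index: drop (k+1) = [], state is history itself
    have hdrop : history.drop (k + 1) = [] := by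
      apply List.drop_eq_nil_of_le; omega
    have htake : history.take (k + 1) = history := by
      apply List.take_of_length_le; omega
    have hstate : history.take (k + 1) ++ (pvExt (history.drop (k + 1))).1 = history := by
      rw [hdrop, htake]; simp [pvExt]
    rw [hstate]
    have hcond : (k : Int) = (history.length : Int) - 1 := by omega
    have hdropk : history.drop k = [history[k]] := by
      rw [List.drop_eq_getElem_cons hk]
      have : history.drop (k + 1) = [] := hdrop
      rw [this]
    rw [pvStepA, if_pos hcond]
    rw [PySem.List.pyGetD_natCast, PySem.List.pySetD_natCast]
    rw [List.set_eq_take_append_cons_drop, if_pos (by omega : k < history.length)]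
    rw [hdropk]
    have : history.drop (k + 1) = [] := hdrop
    rw [this]
    simp [pvExt, List.getElem?_eq_getElem hk]
  · -- interior index
    have hk1 : k + 1 < history.length := by omega
    set E := (pvExt (history.drop (k + 1))).1 with hE
    set s := history.take (k + 1) ++ E with hs
    have hslen : s.length = history.length := hlen
    have htklen : (history.take (k + 1)).length = k + 1 := by simp; omega
    have hcond : ¬ ((k : Int) = (s.length : Int) - 1) := by rw [hslen]; omega
    have hdropne : history.drop (k + 1) ≠ [] := by
      simp [List.drop_eq_nil_iff]; omega
    -- s[k] = history[k]
    have hgetk : PySem.List.pyGetD s (k : Int) [] = history[k] := by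
      rw [PySem.List.pyGetD_natCast, hs]
      rw [List.getD_append _ _ _ _ (by omega)]
      rw [List.getD_eq_getElem _ _ (by simp; omega)]
      simp [List.getElem_take]
    -- head of E
    obtain ⟨r', rest', hdcons⟩ : ∃ r' rest', history.drop (k + 1) = r' :: rest' :=
      List.exists_cons_of_ne_nil hdropne
    have hr' : r' = history[k + 1] := by
      have := List.drop_eq_getElem_cons hk1 (l := history)
      rw [hdcons] at this
      exact (List.cons_eq_cons.mp this).1
    have hEstruct : E = (r' ++ [(pvExt (history.drop (k + 1))).2]) :: (pvExt rest').1 := by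
      rw [hE, hdcons, pvExt_destruct, ← hdcons]
    -- s[k+1] = head of E
    have hgetk1 : PySem.List.pyGetD s ((k : Int) + 1) []
        = r' ++ [(pvExt (history.drop (k + 1))).2] := by
      have : ((k : Int) + 1) = ((k + 1 : Nat) : Int) := by omega
      rw [this, PySem.List.pyGetD_natCast, hs]
      rw [List.getD_append_right (List.take (k + 1) history) E [] (k + 1) (le_of_eq htklen)]
      rw [hEstruct]
      simp [htklen]
    rw [pvStepA, if_neg hcond, hgetk, hgetk1]
    rw [PySem.List.pyGetD_neg_one_append_singleton]
    rw [PySem.List.pySetD_natCast]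
    rw [List.set_eq_take_append_cons_drop, if_pos (by omega : (k:Nat) < s.length)]
    have hstake : s.take k = history.take k := by
      rw [hs, List.take_append_of_le_length (by omega), List.take_take]
      congr 1; omega
    have hsdrop : s.drop (k + 1) = E := by
      have h2 : ((List.take (k + 1) history) ++ E).drop (List.take (k + 1) history).length = E := List.drop_left
      rw [htklen] at h2
      rw [hs, h2]
    rw [hstake, hsdrop]
    -- RHS
    have hdropk : history.drop k = history[k] :: history.drop (k + 1) :=
      List.drop_eq_getElem_cons hk
    rw [hdropk, pvExt_destruct, pvExt_snd_cons _ _ hdropne]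

-- A's whole loop, peeled from index history.length-1 down to 0
lemma pvA_loop (history : List (List Int)) :
    ∀ k : Nat, k ≤ history.length →
      (List.range k).reverse.foldl (fun h (i : Nat) => pvStepA h (i : Int))
        (history.take k ++ (pvExt (history.drop k)).1) = (pvExt history).1 := by
  intro k
  induction k with
  | zero => intro _; simp
  | succ k ih =>
      intro hk
      rw [List.range_succ, List.reverse_append]
      simp only [List.reverse_singleton, List.singleton_append, List.foldl_cons]
      rw [pvStepA_eq history k (by omega)]
      exact ih (by omega)

lemma pvA_eq_ext (history : List (List Int)) :
    extrapolated_value_by_appending history = (pvExt history).1 := by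
  rw [extrapolated_value_by_appending]
  have hr : PySem.List.pyRange 0 (history.length : Int) 1
      = (List.range history.length).map (fun k : Nat => (k : Int)) := by
    rw [PySem.List.pyRange_one]
    simp
  rw [hr, ← List.map_reverse, List.foldl_map]
  have h0 := pvA_loop history history.length (le_refl _)
  rw [List.take_length, List.drop_length] at h0
  rw [show (pvExt []).1 = [] from rfl, List.append_nil] at h0
  exact h0

-- B's whole loop
lemma pvB_loop (history : List (List Int)) :
    history.reverse.foldl pvStepB ([], none)
      = ((pvExt history).1.reverse,
         if history = [] then none else some (pvExt history).2) := by
  induction history with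
  | nil => rfl
  | cons r rest ih =>
      rw [List.reverse_cons, List.foldl_append, ih]
      cases rest with
      | nil => rfl
      | cons s t =>
          simp only [List.foldl_cons, List.foldl_nil]
          rw [pvStepB]
          simp only [if_neg (by simp : ¬ (s :: t = []))]
          rw [pvExt_destruct r (s :: t), pvExt_snd_cons r (s :: t) (by simp),
            pvExt_destruct s t]
          simp

lemma pvB_eq_ext (history : List (List Int)) :
    extrapolated_value_by_appending_alt history = (pvExt history).1 := by
  rw [extrapolated_value_by_appending_alt, pvB_loop]
  simp

-- ===== VERDICT (by name: the statement is the Claim_ definition above) =====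
theorem extrapolated_value_by_appending_spec : Claim_equal_extrapolated_value_by_appending := by
  intro history _ _
  unfold Spec_extrapolated_value_by_appending
  rw [pvA_eq_ext, pvB_eq_ext]
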